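-- pv_equiv track=rewrite | github.com/tylerslussar/FinalProject-Combinatorics | main.py | checkAttack
-- ===== SOURCE A (Python) =====
-- import itertools
--
-- def checkAttack(subset, n):
--
--     subsetTwos = []
--
--     subsetTwos.append(list(itertools.combinations(subset, 2)))
--     # 6, 15, 8
--     # [(6,15), (6,8), (15,8)]
--     for i in subsetTwos:
--         for subsets in i:
--             if (subsets[0] // n == subsets[1] // n) or (subsets[0] % n == subsets[1] % n):
--             # attacking is true
--                 return 0
--
--     return 1
-- ===== SOURCE B (Python) =====
-- def checkAttack(subset, n):
--     if len(subset) < 2: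
--         return 1
--     rows = sorted(x // n for x in subset)
--     cols = sorted(x % n for x in subset)
--     for seq in (rows, cols):
--         for a, b in zip(seq, seq[1:]):
--             if a == b:
--                 return 0
--     return 1
-- ===== Notes on version B (the rewrite author's own statement) =====
-- stated objective: faster
-- what changed: Replaces the scan over all O(k^2) pairs of rooks with sorting the row and column indices and a single adjacent-duplicate scan over each sorted list.
import Mathlib
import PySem

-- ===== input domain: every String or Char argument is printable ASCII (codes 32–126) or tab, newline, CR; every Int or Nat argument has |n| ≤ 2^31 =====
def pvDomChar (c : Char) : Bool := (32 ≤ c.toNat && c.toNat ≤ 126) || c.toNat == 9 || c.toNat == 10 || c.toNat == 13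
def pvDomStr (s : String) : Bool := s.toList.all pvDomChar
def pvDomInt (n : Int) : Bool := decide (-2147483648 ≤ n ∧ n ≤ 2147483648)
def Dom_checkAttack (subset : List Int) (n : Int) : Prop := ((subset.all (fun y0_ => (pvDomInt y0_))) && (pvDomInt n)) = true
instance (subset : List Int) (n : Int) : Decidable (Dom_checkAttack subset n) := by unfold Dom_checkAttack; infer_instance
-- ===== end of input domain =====

-- B replaces A's scan over all pairs by sorting row/column indices and one adjacent-duplicate scan (asymptotically faster).


-- ===== PORT A =====
-- itertools.combinations(subset, 2): all positional pairs (subset[i], subset[j]) with i < j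
def combos2 : List Int → List (Int × Int)
  | [] => []
  | x :: xs => (xs.map (fun y => (x, y))) ++ combos2 xs

-- the inner for-loop with its early return 0
def scanPairs (n : Int) : List (Int × Int) → Int
  | [] => 1
  | p :: rest =>
      if (PySem.Int.floordiv p.1 n == PySem.Int.floordiv p.2 n)
         || (PySem.Int.mod p.1 n == PySem.Int.mod p.2 n) then 0
      else scanPairs n rest

-- A wraps the single combinations list in subsetTwos = [combos]; the outer loop visits that one element
def checkAttack (subset : List Int) (n : Int) : Int :=
  scanPairs n (combos2 subset)

-- ===== PORT B =====
-- the zip(seq, seq[1:]) adjacent scan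
def hasAdjDup : List Int → Bool
  | a :: b :: t => (a == b) || hasAdjDup (b :: t)
  | _ => false

def checkAttack_alt (subset : List Int) (n : Int) : Int :=
  if subset.length < 2 then 1
  else
    let rows := PySem.List.sorted (subset.map (fun x => PySem.Int.floordiv x n)) (fun x => x) false
    let cols := PySem.List.sorted (subset.map (fun x => PySem.Int.mod x n)) (fun x => x) false
    if hasAdjDup rows || hasAdjDup cols then 0 else 1

-- ===== PRECONDITION & SPEC =====
-- Pre_ excludes n = 0 together with at least two rooks: there the Python A (and B) raises ZeroDivisionError.
def Pre_checkAttack (subset : List Int) (n : Int) : Prop := n ≠ 0 ∨ subset.length < 2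
instance (subset : List Int) (n : Int) : Decidable (Pre_checkAttack subset n) := by unfold Pre_checkAttack; infer_instance
def pvWitness_checkAttack : List Int × Int := ([0, 3, 5], 2)

def Spec_checkAttack (subset : List Int) (n : Int) (out : Int) : Prop := out = checkAttack_alt subset n
instance (subset : List Int) (n : Int) (out : Int) : Decidable (Spec_checkAttack subset n out) := by unfold Spec_checkAttack; infer_instance

-- ===== CLAIM (what is proved, stated in full; the proofs are below) =====
def Claim_equal_checkAttack : Prop := ∀ (subset : List Int) (n : Int), Dom_checkAttack subset n → Pre_checkAttack subset n → Spec_checkAttack subset n (checkAttack subset n)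

-- ===== LEMMAS AND PROOFS =====

-- the early-return loop is 'any'
theorem scanPairs_eq (n : Int) (ps : List (Int × Int)) :
    scanPairs n ps =
      if ps.any (fun p => (PySem.Int.floordiv p.1 n == PySem.Int.floordiv p.2 n)
          || (PySem.Int.mod p.1 n == PySem.Int.mod p.2 n)) then 0 else 1 := by
  induction ps with
  | nil => simp [scanPairs]
  | cons p rest ih =>
    simp only [scanPairs, List.any_cons]
    by_cases h : ((PySem.Int.floordiv p.1 n == PySem.Int.floordiv p.2 n)
        || (PySem.Int.mod p.1 n == PySem.Int.mod p.2 n)) = true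
    · simp [h]
    · rw [Bool.not_eq_true] at h
      simp only [h, Bool.false_or, ih]
      simp

-- some pair of the combinations agrees under f iff the mapped list has a duplicate
theorem combos2_exists_iff (f : Int → Int) (l : List Int) :
    (∃ p ∈ combos2 l, f p.1 = f p.2) ↔ ¬ (l.map f).Nodup := by
  induction l with
  | nil => simp [combos2]
  | cons x xs ih =>
    simp only [combos2, List.map_cons, List.nodup_cons, List.mem_append, List.mem_map]
    constructor
    · rintro ⟨p, hp | hp, heq⟩
      · rcases hp with ⟨y, hy, rfl⟩
        intro ⟨hnot, _⟩
        exact hnot ⟨y, hy, heq.symm⟩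
      · intro ⟨_, hnd⟩
        exact (ih.mp ⟨p, hp, heq⟩) hnd
    · intro h
      by_cases hmem : f x ∈ xs.map f
      · rcases List.mem_map.mp hmem with ⟨y, hy, hfy⟩
        exact ⟨(x, y), Or.inl ⟨y, hy, rfl⟩, hfy.symm⟩
      · have : ¬ (xs.map f).Nodup := by
          intro hnd
          exact h ⟨fun ⟨y, hy, hfy⟩ => hmem (List.mem_map.mpr ⟨y, hy, hfy⟩), hnd⟩
        rcases ih.mpr this with ⟨p, hp, heq⟩
        exact ⟨p, Or.inr hp, heq⟩

-- on a ≤-sorted list, an adjacent duplicate is exactly a duplicate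
theorem hasAdjDup_iff (l : List Int) (hs : l.Pairwise (· ≤ ·)) :
    hasAdjDup l = true ↔ ¬ l.Nodup := by
  induction l with
  | nil => simp [hasAdjDup]
  | cons a t ih =>
    cases t with
    | nil => simp [hasAdjDup]
    | cons b t' =>
      have hs' : (b :: t').Pairwise (· ≤ ·) := hs.tail
      have hab : a ≤ b := (List.pairwise_cons.mp hs).1 b (by simp)
      simp only [hasAdjDup, Bool.or_eq_true, beq_iff_eq, List.nodup_cons]
      by_cases hab' : a = b
      · simp [hab']
      · have hnotmem : a ∉ b :: t' := by
          intro hmem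
          rcases List.mem_cons.mp hmem with h | h
          · exact hab' h
          · have hb : b ≤ a := (List.pairwise_cons.mp hs').1 a h
            have : a ≤ b := hab
            exact hab' (le_antisymm this hb)
        simp [hab', hnotmem, ih hs']
      
-- sorted list has a duplicate iff the original does; packaged for both lists
theorem hasAdjDup_sorted_iff (xs : List Int) :
    hasAdjDup (PySem.List.sorted xs (fun x => x) false) = true ↔ ¬ xs.Nodup := by
  have hperm := PySem.List.sorted_perm xs (fun x => x) false
  have hpw := PySem.List.sorted_pairwise xs (fun x => x)
  rw [hasAdjDup_iff _ hpw, hperm.nodup_iff]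

theorem checkAttack_main (subset : List Int) (n : Int) :
    checkAttack subset n = checkAttack_alt subset n := by
  by_cases hlen : subset.length < 2
  · have hc : combos2 subset = [] := by
      match subset, hlen with
      | [], _ => rfl
      | [x], _ => rfl
    simp [checkAttack, checkAttack_alt, hc, scanPairs, hlen]
  · unfold checkAttack checkAttack_alt
    rw [scanPairs_eq]
    simp only [hlen, if_false]
    congr 1
    have hany : (combos2 subset).any (fun p => (PySem.Int.floordiv p.1 n == PySem.Int.floordiv p.2 n)
          || (PySem.Int.mod p.1 n == PySem.Int.mod p.2 n)) = true ↔
        (∃ p ∈ combos2 subset, PySem.Int.floordiv p.1 n = PySem.Int.floordiv p.2 n) ∨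
        (∃ p ∈ combos2 subset, PySem.Int.mod p.1 n = PySem.Int.mod p.2 n) := by
      rw [List.any_eq_true]
      constructor
      · rintro ⟨p, hp, hcond⟩
        rcases Bool.or_eq_true_iff.mp hcond with h | h
        · exact Or.inl ⟨p, hp, beq_iff_eq.mp h⟩
        · exact Or.inr ⟨p, hp, beq_iff_eq.mp h⟩
      · rintro (⟨p, hp, h⟩ | ⟨p, hp, h⟩)
        · exact ⟨p, hp, Bool.or_eq_true_iff.mpr (Or.inl (beq_iff_eq.mpr h))⟩
        · exact ⟨p, hp, Bool.or_eq_true_iff.mpr (Or.inr (beq_iff_eq.mpr h))⟩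
    have hrows := (combos2_exists_iff (fun x => PySem.Int.floordiv x n) subset).trans
      (hasAdjDup_sorted_iff (subset.map (fun x => PySem.Int.floordiv x n))).symm
    have hcols := (combos2_exists_iff (fun x => PySem.Int.mod x n) subset).trans
      (hasAdjDup_sorted_iff (subset.map (fun x => PySem.Int.mod x n))).symm
    by_cases hA : (combos2 subset).any (fun p => (PySem.Int.floordiv p.1 n == PySem.Int.floordiv p.2 n)
          || (PySem.Int.mod p.1 n == PySem.Int.mod p.2 n)) = true
    · rcases hany.mp hA with h | h
      · simp [hA, hrows.mp h]
      · simp [hA, hcols.mp h]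
    · have h1 : hasAdjDup (PySem.List.sorted (subset.map (fun x => PySem.Int.floordiv x n)) (fun x => x) false) = false := by
        rw [Bool.eq_false_iff]
        intro h
        exact hA (hany.mpr (Or.inl (hrows.mpr h)))
      have h2 : hasAdjDup (PySem.List.sorted (subset.map (fun x => PySem.Int.mod x n)) (fun x => x) false) = false := by
        rw [Bool.eq_false_iff]
        intro h
        exact hA (hany.mpr (Or.inr (hcols.mpr h)))
      simp [hA, h1, h2]

-- ===== VERDICT (by name: the statement is the Claim_ definition above) =====
theorem checkAttack_spec : Claim_equal_checkAttack := by
  intro subset n _ _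
  exact checkAttack_main subset n
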